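-- pv_equiv track=rewrite | github.com/sanghyeon1225/baekjoonSolved | 프로그래머스/0/181916. 주사위 게임 3/주사위 게임 3.py | solution
-- ===== SOURCE A (Python) =====
-- def solution(a, b, c, d):
--     # 같은거 4개 > 1111 x p
--     # 같은거 3개 다른거 1개 > (10 × p + q)^2
--     # 같은거 2개씩 (p + q) × |p - q|
--     # 같은거 2개 1개씩 다름 q × r
--     # 모두 다르면 가장 작은 수
--     num = 0
--     num1 = 0
--     num2 = 0
--     # 주사위 굴린수에 해당하는 인덱스 추가
--     list = [0] * 7
--     list[a] += 1
--     list[b] += 1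
--     list[c] += 1
--     list[d] += 1
--
--     # 수 할당이 어떻게 됐는지 count
--     c1 = 0
--     c2 = 0
--     c3 = 0
--     c4 = 0
--     for i in range(7):
--         if list[i] == 1:
--             c1 += 1
--         if list[i] == 2:
--             c2 += 1
--         if list[i] == 3:
--             c3 += 1
--         if list[i] == 4:
--             c4 += 1
--
--     if(c4 == 1):
--         for i in range(7):
--             if list[i] == 4:
--                 return i * 1111
--
--     if(c3 == 1 and c1 == 1):
--         for i in range(7):
--             if list[i] == 3:
--                 num = i
--             elif list[i] == 1:
--                 num2 = i
--         return ((10 * num) + num2) ** 2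
--
--
--     if(c2 == 2):
--         count = []
--         for i in range(7):
--             if list[i] == 2:
--                 count.append(i)
--         num = count[0]
--         num1 = count[1]
--         return (num + num1) * abs(num - num1)
--
--     if(c2 == 1 and c1 == 2):
--         count = []
--         for i in range(7):
--             if list[i] == 1:
--                 count.append(i)
--         return count[0] * count[1]
--
--     if(c1 == 4):
--         count = []
--         for i in range(7):
--             if list[i] == 1:
--                 count.append(i)
--         return min(count)
-- ===== SOURCE B (Python) =====
-- def solution(a, b, c, d):
--     # One pass into a 7-slot frequency table, then a single sorted list of
--     # (count, face) groups replaces A's counts-of-counts plus five rescans.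
--     freq = [0] * 7
--     for x in (a, b, c, d):
--         freq[x] += 1
--     groups = sorted((n, i) for i, n in enumerate(freq) if n)
--     if groups[-1][0] == 4:
--         return groups[-1][1] * 1111
--     if groups[-1][0] == 3:
--         return (10 * groups[-1][1] + groups[0][1]) ** 2
--     if groups[0][0] == 2:
--         p, q = groups[0][1], groups[1][1]
--         return (p + q) * abs(p - q)
--     if groups[-1][0] == 2:
--         return groups[0][1] * groups[1][1]
--     return groups[0][1]
-- ===== Notes on version B (the rewrite author's own statement) =====
-- stated objective: simpler
-- what changed: B replaces A's counts-of-counts (c1..c4) plus five separate rescans of the 7-slot frequency table by one sorted list of (count, face) groups from which every case reads its answer directly.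
import Mathlib
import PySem

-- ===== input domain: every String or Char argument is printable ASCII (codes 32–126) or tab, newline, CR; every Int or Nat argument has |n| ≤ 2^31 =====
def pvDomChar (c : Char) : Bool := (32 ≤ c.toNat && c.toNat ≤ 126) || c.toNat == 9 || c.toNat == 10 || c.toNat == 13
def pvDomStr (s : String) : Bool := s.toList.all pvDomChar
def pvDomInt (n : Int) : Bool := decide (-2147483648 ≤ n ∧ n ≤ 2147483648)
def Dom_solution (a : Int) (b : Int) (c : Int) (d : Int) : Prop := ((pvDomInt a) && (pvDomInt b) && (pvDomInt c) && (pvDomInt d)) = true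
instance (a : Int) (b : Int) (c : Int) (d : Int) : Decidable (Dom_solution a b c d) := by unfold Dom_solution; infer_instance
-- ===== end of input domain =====

-- B replaces A's counts-of-counts (c1..c4) and five rescans of the frequency table by one
-- sorted list of (count, face) groups read directly; objective: simpler.


-- ===== PORT A =====
-- `l[i] += 1` with Python index semantics (exact for -len ≤ i < len; other i raise
-- IndexError in Python and are excluded by Pre_solution below). Both Pythons contain
-- this very statement, so both ports share the helper.
def pyIncAt (l : List Int) (i : Int) : List Int :=
  PySem.List.pySetD l i (PySem.List.pyGetD l i 0 + 1)

-- the body of A after the four `list[x] += 1` statements, as a helper over that list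
def solutionRest (lst : List Int) : Int :=
  let cs := (PySem.List.pyRange 0 7 1).foldl (fun (s : Int × Int × Int × Int) i =>
      let v := PySem.List.pyGetD lst i 0
      let c1 := if v == 1 then s.1 + 1 else s.1
      let c2 := if v == 2 then s.2.1 + 1 else s.2.1
      let c3 := if v == 3 then s.2.2.1 + 1 else s.2.2.1
      let c4 := if v == 4 then s.2.2.2 + 1 else s.2.2.2
      (c1, c2, c3, c4)) (0, 0, 0, 0)
  let c1 := cs.1
  let c2 := cs.2.1
  let c3 := cs.2.2.1
  let c4 := cs.2.2.2
  -- 'if c4 == 1: for i in range(7): if list[i] == 4: return i * 1111' — a return inside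
  -- the loop; when nothing is returned Python falls through to the next 'if'
  let r4 : Option Int :=
    if c4 == 1 then ((PySem.List.pyRange 0 7 1).find? (fun i => PySem.List.pyGetD lst i 0 == 4)).map (· * 1111)
    else none
  match r4 with
  | some v => v
  | none =>
    if c3 == 1 && c1 == 1 then
      let p := (PySem.List.pyRange 0 7 1).foldl (fun (s : Int × Int) i =>
          if PySem.List.pyGetD lst i 0 == 3 then (i, s.2)
          else if PySem.List.pyGetD lst i 0 == 1 then (s.1, i)
          else s) (0, 0)
      (10 * p.1 + p.2) ^ 2
    else if c2 == 2 then
      let count := (PySem.List.pyRange 0 7 1).foldl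
        (fun (acc : List Int) i => if PySem.List.pyGetD lst i 0 == 2 then acc ++ [i] else acc) []
      -- count[0]/count[1]: under the guard c2 == 2 the list has exactly two elements,
      -- the defaults are never read
      (PySem.List.pyGetD count 0 0 + PySem.List.pyGetD count 1 0) *
        |PySem.List.pyGetD count 0 0 - PySem.List.pyGetD count 1 0|
    else if c2 == 1 && c1 == 2 then
      let count := (PySem.List.pyRange 0 7 1).foldl
        (fun (acc : List Int) i => if PySem.List.pyGetD lst i 0 == 1 then acc ++ [i] else acc) []
      PySem.List.pyGetD count 0 0 * PySem.List.pyGetD count 1 0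
    else if c1 == 4 then
      let count := (PySem.List.pyRange 0 7 1).foldl
        (fun (acc : List Int) i => if PySem.List.pyGetD lst i 0 == 1 then acc ++ [i] else acc) []
      (PySem.List.min? count (fun x => x)).getD 0
    else 0  -- Python returns None here; unreachable for four dice (some case always matches)

def solution (a : Int) (b : Int) (c : Int) (d : Int) : Int :=
  solutionRest (pyIncAt (pyIncAt (pyIncAt (pyIncAt (List.replicate 7 (0 : Int)) a) b) c) d)

-- ===== PORT B =====
-- the body of B after the frequency table is filled
def solution_altRest (freq : List Int) : Int :=
  let groups := PySem.List.sorted2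
    (((PySem.List.enumerate freq 0).filter (fun p => p.2 != 0)).map (fun p => (p.2, p.1)))
    (fun g => g.1) (fun g => g.2) false
  -- groups[-1]/groups[0]/groups[1]: nonempty for four dice, defaults never read
  let last := PySem.List.pyGetD groups (-1) ((0 : Int), (0 : Int))
  let first := PySem.List.pyGetD groups 0 ((0 : Int), (0 : Int))
  if last.1 == 4 then last.2 * 1111
  else if last.1 == 3 then (10 * last.2 + first.2) ^ 2
  else if first.1 == 2 then
    let p := first.2
    let q := (PySem.List.pyGetD groups 1 ((0 : Int), (0 : Int))).2
    (p + q) * |p - q|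
  else if last.1 == 2 then first.2 * (PySem.List.pyGetD groups 1 ((0 : Int), (0 : Int))).2
  else first.2

def solution_alt (a : Int) (b : Int) (c : Int) (d : Int) : Int :=
  solution_altRest ([a, b, c, d].foldl pyIncAt (List.replicate 7 (0 : Int)))

-- ===== PRECONDITION & SPEC =====
-- Pre_ is exactly where Python A returns: outside -7..6 a die indexes the 7-slot table
-- out of range and A raises IndexError (B raises there too).
def Pre_solution (a : Int) (b : Int) (c : Int) (d : Int) : Prop :=
  -7 ≤ a ∧ a ≤ 6 ∧ -7 ≤ b ∧ b ≤ 6 ∧ -7 ≤ c ∧ c ≤ 6 ∧ -7 ≤ d ∧ d ≤ 6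
instance (a : Int) (b : Int) (c : Int) (d : Int) : Decidable (Pre_solution a b c d) := by
  unfold Pre_solution; infer_instance
def pvWitness_solution : Int × Int × Int × Int := (2, 2, 6, 1)
def Spec_solution (a : Int) (b : Int) (c : Int) (d : Int) (out : Int) : Prop := out = solution_alt a b c d
instance (a : Int) (b : Int) (c : Int) (d : Int) (out : Int) : Decidable (Spec_solution a b c d out) := by unfold Spec_solution; infer_instance

-- ===== CLAIM (what is proved, stated in full; the proofs are below) =====
def Claim_equal_solution : Prop := ∀ (a : Int) (b : Int) (c : Int) (d : Int), Dom_solution a b c d → Pre_solution a b c d → Spec_solution a b c d (solution a b c d)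

-- ===== LEMMAS AND PROOFS =====
-- the 14 die values Pre_solution admits
def pvVals : List Int := [-7, -6, -5, -4, -3, -2, -1, 0, 1, 2, 3, 4, 5, 6]

-- pvSk: every frequency table reachable after k admitted dice have been tallied
def pvS1 : List (List Int) := [[0, 0, 0, 0, 0, 0, 1],
  [0, 0, 0, 0, 0, 1, 0],
  [0, 0, 0, 0, 1, 0, 0],
  [0, 0, 0, 1, 0, 0, 0],
  [0, 0, 1, 0, 0, 0, 0],
  [0, 1, 0, 0, 0, 0, 0],
  [1, 0, 0, 0, 0, 0, 0]]

def pvS2 : List (List Int) := [[0, 0, 0, 0, 0, 0, 2],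
  [0, 0, 0, 0, 0, 1, 1],
  [0, 0, 0, 0, 0, 2, 0],
  [0, 0, 0, 0, 1, 0, 1],
  [0, 0, 0, 0, 1, 1, 0],
  [0, 0, 0, 0, 2, 0, 0],
  [0, 0, 0, 1, 0, 0, 1],
  [0, 0, 0, 1, 0, 1, 0],
  [0, 0, 0, 1, 1, 0, 0],
  [0, 0, 0, 2, 0, 0, 0],
  [0, 0, 1, 0, 0, 0, 1],
  [0, 0, 1, 0, 0, 1, 0],
  [0, 0, 1, 0, 1, 0, 0],
  [0, 0, 1, 1, 0, 0, 0],
  [0, 0, 2, 0, 0, 0, 0],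
  [0, 1, 0, 0, 0, 0, 1],
  [0, 1, 0, 0, 0, 1, 0],
  [0, 1, 0, 0, 1, 0, 0],
  [0, 1, 0, 1, 0, 0, 0],
  [0, 1, 1, 0, 0, 0, 0],
  [0, 2, 0, 0, 0, 0, 0],
  [1, 0, 0, 0, 0, 0, 1],
  [1, 0, 0, 0, 0, 1, 0],
  [1, 0, 0, 0, 1, 0, 0],
  [1, 0, 0, 1, 0, 0, 0],
  [1, 0, 1, 0, 0, 0, 0],
  [1, 1, 0, 0, 0, 0, 0],
  [2, 0, 0, 0, 0, 0, 0]]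

def pvS3 : List (List Int) := [[0, 0, 0, 0, 0, 0, 3],
  [0, 0, 0, 0, 0, 1, 2],
  [0, 0, 0, 0, 0, 2, 1],
  [0, 0, 0, 0, 0, 3, 0],
  [0, 0, 0, 0, 1, 0, 2],
  [0, 0, 0, 0, 1, 1, 1],
  [0, 0, 0, 0, 1, 2, 0],
  [0, 0, 0, 0, 2, 0, 1],
  [0, 0, 0, 0, 2, 1, 0],
  [0, 0, 0, 0, 3, 0, 0],
  [0, 0, 0, 1, 0, 0, 2],
  [0, 0, 0, 1, 0, 1, 1],
  [0, 0, 0, 1, 0, 2, 0],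
  [0, 0, 0, 1, 1, 0, 1],
  [0, 0, 0, 1, 1, 1, 0],
  [0, 0, 0, 1, 2, 0, 0],
  [0, 0, 0, 2, 0, 0, 1],
  [0, 0, 0, 2, 0, 1, 0],
  [0, 0, 0, 2, 1, 0, 0],
  [0, 0, 0, 3, 0, 0, 0],
  [0, 0, 1, 0, 0, 0, 2],
  [0, 0, 1, 0, 0, 1, 1],
  [0, 0, 1, 0, 0, 2, 0],
  [0, 0, 1, 0, 1, 0, 1],
  [0, 0, 1, 0, 1, 1, 0],
  [0, 0, 1, 0, 2, 0, 0],
  [0, 0, 1, 1, 0, 0, 1],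
  [0, 0, 1, 1, 0, 1, 0],
  [0, 0, 1, 1, 1, 0, 0],
  [0, 0, 1, 2, 0, 0, 0],
  [0, 0, 2, 0, 0, 0, 1],
  [0, 0, 2, 0, 0, 1, 0],
  [0, 0, 2, 0, 1, 0, 0],
  [0, 0, 2, 1, 0, 0, 0],
  [0, 0, 3, 0, 0, 0, 0],
  [0, 1, 0, 0, 0, 0, 2],
  [0, 1, 0, 0, 0, 1, 1],
  [0, 1, 0, 0, 0, 2, 0],
  [0, 1, 0, 0, 1, 0, 1],
  [0, 1, 0, 0, 1, 1, 0],
  [0, 1, 0, 0, 2, 0, 0],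
  [0, 1, 0, 1, 0, 0, 1],
  [0, 1, 0, 1, 0, 1, 0],
  [0, 1, 0, 1, 1, 0, 0],
  [0, 1, 0, 2, 0, 0, 0],
  [0, 1, 1, 0, 0, 0, 1],
  [0, 1, 1, 0, 0, 1, 0],
  [0, 1, 1, 0, 1, 0, 0],
  [0, 1, 1, 1, 0, 0, 0],
  [0, 1, 2, 0, 0, 0, 0],
  [0, 2, 0, 0, 0, 0, 1],
  [0, 2, 0, 0, 0, 1, 0],
  [0, 2, 0, 0, 1, 0, 0],
  [0, 2, 0, 1, 0, 0, 0],
  [0, 2, 1, 0, 0, 0, 0],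
  [0, 3, 0, 0, 0, 0, 0],
  [1, 0, 0, 0, 0, 0, 2],
  [1, 0, 0, 0, 0, 1, 1],
  [1, 0, 0, 0, 0, 2, 0],
  [1, 0, 0, 0, 1, 0, 1],
  [1, 0, 0, 0, 1, 1, 0],
  [1, 0, 0, 0, 2, 0, 0],
  [1, 0, 0, 1, 0, 0, 1],
  [1, 0, 0, 1, 0, 1, 0],
  [1, 0, 0, 1, 1, 0, 0],
  [1, 0, 0, 2, 0, 0, 0],
  [1, 0, 1, 0, 0, 0, 1],
  [1, 0, 1, 0, 0, 1, 0],
  [1, 0, 1, 0, 1, 0, 0],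
  [1, 0, 1, 1, 0, 0, 0],
  [1, 0, 2, 0, 0, 0, 0],
  [1, 1, 0, 0, 0, 0, 1],
  [1, 1, 0, 0, 0, 1, 0],
  [1, 1, 0, 0, 1, 0, 0],
  [1, 1, 0, 1, 0, 0, 0],
  [1, 1, 1, 0, 0, 0, 0],
  [1, 2, 0, 0, 0, 0, 0],
  [2, 0, 0, 0, 0, 0, 1],
  [2, 0, 0, 0, 0, 1, 0],
  [2, 0, 0, 0, 1, 0, 0],
  [2, 0, 0, 1, 0, 0, 0],
  [2, 0, 1, 0, 0, 0, 0],
  [2, 1, 0, 0, 0, 0, 0],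
  [3, 0, 0, 0, 0, 0, 0]]

def pvS4 : List (List Int) := [[0, 0, 0, 0, 0, 0, 4],
  [0, 0, 0, 0, 0, 1, 3],
  [0, 0, 0, 0, 0, 2, 2],
  [0, 0, 0, 0, 0, 3, 1],
  [0, 0, 0, 0, 0, 4, 0],
  [0, 0, 0, 0, 1, 0, 3],
  [0, 0, 0, 0, 1, 1, 2],
  [0, 0, 0, 0, 1, 2, 1],
  [0, 0, 0, 0, 1, 3, 0],
  [0, 0, 0, 0, 2, 0, 2],
  [0, 0, 0, 0, 2, 1, 1],
  [0, 0, 0, 0, 2, 2, 0],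
  [0, 0, 0, 0, 3, 0, 1],
  [0, 0, 0, 0, 3, 1, 0],
  [0, 0, 0, 0, 4, 0, 0],
  [0, 0, 0, 1, 0, 0, 3],
  [0, 0, 0, 1, 0, 1, 2],
  [0, 0, 0, 1, 0, 2, 1],
  [0, 0, 0, 1, 0, 3, 0],
  [0, 0, 0, 1, 1, 0, 2],
  [0, 0, 0, 1, 1, 1, 1],
  [0, 0, 0, 1, 1, 2, 0],
  [0, 0, 0, 1, 2, 0, 1],
  [0, 0, 0, 1, 2, 1, 0],
  [0, 0, 0, 1, 3, 0, 0],
  [0, 0, 0, 2, 0, 0, 2],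
  [0, 0, 0, 2, 0, 1, 1],
  [0, 0, 0, 2, 0, 2, 0],
  [0, 0, 0, 2, 1, 0, 1],
  [0, 0, 0, 2, 1, 1, 0],
  [0, 0, 0, 2, 2, 0, 0],
  [0, 0, 0, 3, 0, 0, 1],
  [0, 0, 0, 3, 0, 1, 0],
  [0, 0, 0, 3, 1, 0, 0],
  [0, 0, 0, 4, 0, 0, 0],
  [0, 0, 1, 0, 0, 0, 3],
  [0, 0, 1, 0, 0, 1, 2],
  [0, 0, 1, 0, 0, 2, 1],
  [0, 0, 1, 0, 0, 3, 0],
  [0, 0, 1, 0, 1, 0, 2],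
  [0, 0, 1, 0, 1, 1, 1],
  [0, 0, 1, 0, 1, 2, 0],
  [0, 0, 1, 0, 2, 0, 1],
  [0, 0, 1, 0, 2, 1, 0],
  [0, 0, 1, 0, 3, 0, 0],
  [0, 0, 1, 1, 0, 0, 2],
  [0, 0, 1, 1, 0, 1, 1],
  [0, 0, 1, 1, 0, 2, 0],
  [0, 0, 1, 1, 1, 0, 1],
  [0, 0, 1, 1, 1, 1, 0],
  [0, 0, 1, 1, 2, 0, 0],
  [0, 0, 1, 2, 0, 0, 1],
  [0, 0, 1, 2, 0, 1, 0],
  [0, 0, 1, 2, 1, 0, 0],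
  [0, 0, 1, 3, 0, 0, 0],
  [0, 0, 2, 0, 0, 0, 2],
  [0, 0, 2, 0, 0, 1, 1],
  [0, 0, 2, 0, 0, 2, 0],
  [0, 0, 2, 0, 1, 0, 1],
  [0, 0, 2, 0, 1, 1, 0],
  [0, 0, 2, 0, 2, 0, 0],
  [0, 0, 2, 1, 0, 0, 1],
  [0, 0, 2, 1, 0, 1, 0],
  [0, 0, 2, 1, 1, 0, 0],
  [0, 0, 2, 2, 0, 0, 0],
  [0, 0, 3, 0, 0, 0, 1],
  [0, 0, 3, 0, 0, 1, 0],
  [0, 0, 3, 0, 1, 0, 0],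
  [0, 0, 3, 1, 0, 0, 0],
  [0, 0, 4, 0, 0, 0, 0],
  [0, 1, 0, 0, 0, 0, 3],
  [0, 1, 0, 0, 0, 1, 2],
  [0, 1, 0, 0, 0, 2, 1],
  [0, 1, 0, 0, 0, 3, 0],
  [0, 1, 0, 0, 1, 0, 2],
  [0, 1, 0, 0, 1, 1, 1],
  [0, 1, 0, 0, 1, 2, 0],
  [0, 1, 0, 0, 2, 0, 1],
  [0, 1, 0, 0, 2, 1, 0],
  [0, 1, 0, 0, 3, 0, 0],
  [0, 1, 0, 1, 0, 0, 2],
  [0, 1, 0, 1, 0, 1, 1],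
  [0, 1, 0, 1, 0, 2, 0],
  [0, 1, 0, 1, 1, 0, 1],
  [0, 1, 0, 1, 1, 1, 0],
  [0, 1, 0, 1, 2, 0, 0],
  [0, 1, 0, 2, 0, 0, 1],
  [0, 1, 0, 2, 0, 1, 0],
  [0, 1, 0, 2, 1, 0, 0],
  [0, 1, 0, 3, 0, 0, 0],
  [0, 1, 1, 0, 0, 0, 2],
  [0, 1, 1, 0, 0, 1, 1],
  [0, 1, 1, 0, 0, 2, 0],
  [0, 1, 1, 0, 1, 0, 1],
  [0, 1, 1, 0, 1, 1, 0],
  [0, 1, 1, 0, 2, 0, 0],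
  [0, 1, 1, 1, 0, 0, 1],
  [0, 1, 1, 1, 0, 1, 0],
  [0, 1, 1, 1, 1, 0, 0],
  [0, 1, 1, 2, 0, 0, 0],
  [0, 1, 2, 0, 0, 0, 1],
  [0, 1, 2, 0, 0, 1, 0],
  [0, 1, 2, 0, 1, 0, 0],
  [0, 1, 2, 1, 0, 0, 0],
  [0, 1, 3, 0, 0, 0, 0],
  [0, 2, 0, 0, 0, 0, 2],
  [0, 2, 0, 0, 0, 1, 1],
  [0, 2, 0, 0, 0, 2, 0],
  [0, 2, 0, 0, 1, 0, 1],
  [0, 2, 0, 0, 1, 1, 0],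
  [0, 2, 0, 0, 2, 0, 0],
  [0, 2, 0, 1, 0, 0, 1],
  [0, 2, 0, 1, 0, 1, 0],
  [0, 2, 0, 1, 1, 0, 0],
  [0, 2, 0, 2, 0, 0, 0],
  [0, 2, 1, 0, 0, 0, 1],
  [0, 2, 1, 0, 0, 1, 0],
  [0, 2, 1, 0, 1, 0, 0],
  [0, 2, 1, 1, 0, 0, 0],
  [0, 2, 2, 0, 0, 0, 0],
  [0, 3, 0, 0, 0, 0, 1],
  [0, 3, 0, 0, 0, 1, 0],
  [0, 3, 0, 0, 1, 0, 0],
  [0, 3, 0, 1, 0, 0, 0],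
  [0, 3, 1, 0, 0, 0, 0],
  [0, 4, 0, 0, 0, 0, 0],
  [1, 0, 0, 0, 0, 0, 3],
  [1, 0, 0, 0, 0, 1, 2],
  [1, 0, 0, 0, 0, 2, 1],
  [1, 0, 0, 0, 0, 3, 0],
  [1, 0, 0, 0, 1, 0, 2],
  [1, 0, 0, 0, 1, 1, 1],
  [1, 0, 0, 0, 1, 2, 0],
  [1, 0, 0, 0, 2, 0, 1],
  [1, 0, 0, 0, 2, 1, 0],
  [1, 0, 0, 0, 3, 0, 0],
  [1, 0, 0, 1, 0, 0, 2],
  [1, 0, 0, 1, 0, 1, 1],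
  [1, 0, 0, 1, 0, 2, 0],
  [1, 0, 0, 1, 1, 0, 1],
  [1, 0, 0, 1, 1, 1, 0],
  [1, 0, 0, 1, 2, 0, 0],
  [1, 0, 0, 2, 0, 0, 1],
  [1, 0, 0, 2, 0, 1, 0],
  [1, 0, 0, 2, 1, 0, 0],
  [1, 0, 0, 3, 0, 0, 0],
  [1, 0, 1, 0, 0, 0, 2],
  [1, 0, 1, 0, 0, 1, 1],
  [1, 0, 1, 0, 0, 2, 0],
  [1, 0, 1, 0, 1, 0, 1],
  [1, 0, 1, 0, 1, 1, 0],
  [1, 0, 1, 0, 2, 0, 0],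
  [1, 0, 1, 1, 0, 0, 1],
  [1, 0, 1, 1, 0, 1, 0],
  [1, 0, 1, 1, 1, 0, 0],
  [1, 0, 1, 2, 0, 0, 0],
  [1, 0, 2, 0, 0, 0, 1],
  [1, 0, 2, 0, 0, 1, 0],
  [1, 0, 2, 0, 1, 0, 0],
  [1, 0, 2, 1, 0, 0, 0],
  [1, 0, 3, 0, 0, 0, 0],
  [1, 1, 0, 0, 0, 0, 2],
  [1, 1, 0, 0, 0, 1, 1],
  [1, 1, 0, 0, 0, 2, 0],
  [1, 1, 0, 0, 1, 0, 1],
  [1, 1, 0, 0, 1, 1, 0],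
  [1, 1, 0, 0, 2, 0, 0],
  [1, 1, 0, 1, 0, 0, 1],
  [1, 1, 0, 1, 0, 1, 0],
  [1, 1, 0, 1, 1, 0, 0],
  [1, 1, 0, 2, 0, 0, 0],
  [1, 1, 1, 0, 0, 0, 1],
  [1, 1, 1, 0, 0, 1, 0],
  [1, 1, 1, 0, 1, 0, 0],
  [1, 1, 1, 1, 0, 0, 0],
  [1, 1, 2, 0, 0, 0, 0],
  [1, 2, 0, 0, 0, 0, 1],
  [1, 2, 0, 0, 0, 1, 0],
  [1, 2, 0, 0, 1, 0, 0],
  [1, 2, 0, 1, 0, 0, 0],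
  [1, 2, 1, 0, 0, 0, 0],
  [1, 3, 0, 0, 0, 0, 0],
  [2, 0, 0, 0, 0, 0, 2],
  [2, 0, 0, 0, 0, 1, 1],
  [2, 0, 0, 0, 0, 2, 0],
  [2, 0, 0, 0, 1, 0, 1],
  [2, 0, 0, 0, 1, 1, 0],
  [2, 0, 0, 0, 2, 0, 0],
  [2, 0, 0, 1, 0, 0, 1],
  [2, 0, 0, 1, 0, 1, 0],
  [2, 0, 0, 1, 1, 0, 0],
  [2, 0, 0, 2, 0, 0, 0],
  [2, 0, 1, 0, 0, 0, 1],
  [2, 0, 1, 0, 0, 1, 0],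
  [2, 0, 1, 0, 1, 0, 0],
  [2, 0, 1, 1, 0, 0, 0],
  [2, 0, 2, 0, 0, 0, 0],
  [2, 1, 0, 0, 0, 0, 1],
  [2, 1, 0, 0, 0, 1, 0],
  [2, 1, 0, 0, 1, 0, 0],
  [2, 1, 0, 1, 0, 0, 0],
  [2, 1, 1, 0, 0, 0, 0],
  [2, 2, 0, 0, 0, 0, 0],
  [3, 0, 0, 0, 0, 0, 1],
  [3, 0, 0, 0, 0, 1, 0],
  [3, 0, 0, 0, 1, 0, 0],
  [3, 0, 0, 1, 0, 0, 0],
  [3, 0, 1, 0, 0, 0, 0],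
  [3, 1, 0, 0, 0, 0, 0],
  [4, 0, 0, 0, 0, 0, 0]]

theorem pvMemVals {x : Int} (h1 : -7 ≤ x) (h2 : x ≤ 6) : x ∈ pvVals := by
  unfold pvVals
  simp only [List.mem_cons]
  omega

set_option maxRecDepth 4000 in
theorem pvStep1 : ∀ i ∈ pvVals, pyIncAt (List.replicate 7 (0 : Int)) i ∈ pvS1 := by decide

set_option maxRecDepth 4000 in
theorem pvStep2 : ∀ l ∈ pvS1, ∀ i ∈ pvVals, pyIncAt l i ∈ pvS2 := by decide

set_option maxHeartbeats 1000000 in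
set_option maxRecDepth 8000 in
theorem pvStep3 : ∀ l ∈ pvS2, ∀ i ∈ pvVals, pyIncAt l i ∈ pvS3 := by decide

set_option maxHeartbeats 4000000 in
set_option maxRecDepth 10000 in
theorem pvStep4 : ∀ l ∈ pvS3, ∀ i ∈ pvVals, pyIncAt l i ∈ pvS4 := by decide

set_option maxHeartbeats 4000000 in
set_option maxRecDepth 10000 in
theorem pvMain : ∀ l ∈ pvS4, solutionRest l = solution_altRest l := by decide

-- ===== VERDICT (by name: the statement is the Claim_ definition above) =====
theorem solution_spec : Claim_equal_solution := by
  intro a b c d _ hpre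
  obtain ⟨h1, h2, h3, h4, h5, h6, h7, h8⟩ := hpre
  have hmem : pyIncAt (pyIncAt (pyIncAt (pyIncAt (List.replicate 7 (0 : Int)) a) b) c) d ∈ pvS4 :=
    pvStep4 _ (pvStep3 _ (pvStep2 _ (pvStep1 a (pvMemVals h1 h2)) b (pvMemVals h3 h4))
      c (pvMemVals h5 h6)) d (pvMemVals h7 h8)
  show solution a b c d = solution_alt a b c d
  exact pvMain _ hmem
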